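-- pv_equiv track=rewrite | github.com/Harshi-99/CPP | stringSimilarity.py | stringSimilarity
-- ===== SOURCE A (Python) =====
-- def stringSimilarity(a):
--
--     n = len(a)
--     z = [0]*n
--     l=r=0
--     for i in range(1,n):
--         if (i<=r):
--             z[i]=min (r - i + 1, z[i - l])
--         while(i + z[i] < n and a[z[i]] == a[i + z[i]]):
--             z[i]+=1
--         if (i + z[i] - 1 > r):
--             l = i
--             r = i + z[i] - 1
--     return sum(z)+n
-- ===== SOURCE B (Python) =====
-- def stringSimilarity(a):
--     n = len(a)
--     total = 0
--     for i in range(n):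
--         j = 0
--         while i + j < n and a[j] == a[i + j]:
--             j += 1
--         total += j
--     return total
-- ===== Notes on version B (the rewrite author's own statement) =====
-- stated objective: simpler
-- what changed: Replaces the Z-algorithm's single-pass window (l,r box, z-array, min-reuse) with the direct definition: for each start index a naive longest-common-prefix scan, summed from i = 0 so the whole-string term supplies the extra n that A adds after summing z.
import Mathlib
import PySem

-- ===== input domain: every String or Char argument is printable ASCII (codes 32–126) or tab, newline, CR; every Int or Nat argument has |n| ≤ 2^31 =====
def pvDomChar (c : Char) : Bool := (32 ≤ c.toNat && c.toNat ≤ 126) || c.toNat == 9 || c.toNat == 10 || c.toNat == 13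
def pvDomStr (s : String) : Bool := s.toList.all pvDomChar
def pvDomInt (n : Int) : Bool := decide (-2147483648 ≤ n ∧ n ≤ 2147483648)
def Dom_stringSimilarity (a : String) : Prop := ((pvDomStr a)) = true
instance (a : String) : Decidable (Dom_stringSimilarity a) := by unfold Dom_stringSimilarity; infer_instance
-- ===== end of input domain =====

-- B replaces A's single-pass Z-algorithm window by the direct definition (naive LCP scan per
-- suffix, summed from i = 0): simpler, not faster.

-- ===== PORT A =====

-- A's inner 'while(i + z[i] < n and a[z[i]] == a[i + z[i]]): z[i]+=1', started at z[i] = j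
def aWhile (cs : List Char) (i j : Nat) : Nat :=
  if i + j < cs.length ∧ cs.getD j ' ' = cs.getD (i + j) ' ' then aWhile cs i (j + 1) else j
termination_by cs.length - (i + j)
decreasing_by omega

-- one iteration of A's 'for i in range(1, n)' loop over the state (z, l, r)
def aStep (cs : List Char) (s : List Nat × Nat × Nat) (i : Nat) : List Nat × Nat × Nat :=
  let z := s.1; let l := s.2.1; let r := s.2.2
  -- z[i] is still 0 unless the 'if (i<=r)' branch assigns it
  let z0 := if i ≤ r then min (r - i + 1) (z.getD (i - l) 0) else 0
  let zi := aWhile cs i z0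
  let z' := z.set i zi
  if i + zi - 1 > r then (z', i, i + zi - 1) else (z', l, r)

def stringSimilarity (a : String) : Int :=
  let cs := a.toList
  let n := cs.length
  let s := (List.range' 1 (n - 1) 1).foldl (aStep cs) (List.replicate n 0, 0, 0)
  (s.1.sum : Int) + (n : Int)

-- ===== PORT B =====

-- B's 'j = 0; while i + j < n and a[j] == a[i + j]: j += 1'
def bWhile (cs : List Char) (i j : Nat) : Nat :=
  if i + j < cs.length ∧ cs.getD j ' ' = cs.getD (i + j) ' ' then bWhile cs i (j + 1) else j
termination_by cs.length - (i + j)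
decreasing_by omega

def stringSimilarity_alt (a : String) : Int :=
  let cs := a.toList
  ((List.range cs.length).foldl (fun tot i => tot + bWhile cs i 0) 0 : Nat)

-- ===== PRECONDITION & SPEC =====
def Spec_stringSimilarity (a : String) (out : Int) : Prop := out = stringSimilarity_alt a
instance (a : String) (out : Int) : Decidable (Spec_stringSimilarity a out) := by unfold Spec_stringSimilarity; infer_instance

-- ===== CLAIM (what is proved, stated in full; the proofs are below) =====
def Claim_equal_stringSimilarity : Prop := ∀ (a : String), Dom_stringSimilarity a → Spec_stringSimilarity a (stringSimilarity a)

-- ===== LEMMAS AND PROOFS =====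

theorem aWhile_eq_bWhile (cs : List Char) (i j : Nat) : aWhile cs i j = bWhile cs i j := by
  rw [aWhile, bWhile]
  split
  · exact aWhile_eq_bWhile cs i (j + 1)
  · rfl
termination_by cs.length - (i + j)
decreasing_by omega

theorem bWhile_le (cs : List Char) (i j : Nat) (h : i + j ≤ cs.length) :
    i + bWhile cs i j ≤ cs.length := by
  rw [bWhile]
  split
  · exact bWhile_le cs i (j + 1) (by omega)
  · exact h
termination_by cs.length - (i + j)
decreasing_by omega

-- every index below the loop's result matches (starting from j, for k ≥ j)
theorem bWhile_matches (cs : List Char) (i j k : Nat) (hj : j ≤ k)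
    (hk : k < bWhile cs i j) :
    i + k < cs.length ∧ cs.getD k ' ' = cs.getD (i + k) ' ' := by
  rw [bWhile] at hk
  split at hk
  · rename_i hcond
    rcases Nat.eq_or_lt_of_le hj with rfl | hlt
    · exact hcond
    · exact bWhile_matches cs i (j + 1) k hlt hk
  · omega
termination_by cs.length - (i + j)
decreasing_by omega

theorem bWhile_step (cs : List Char) (i j : Nat)
    (h : i + j < cs.length ∧ cs.getD j ' ' = cs.getD (i + j) ' ') :
    bWhile cs i j = bWhile cs i (j + 1) := by
  conv_lhs => rw [bWhile]
  rw [if_pos h]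

-- if the first j characters are known to match, the loop may start at j
theorem bWhile_from (cs : List Char) (i j : Nat)
    (h : ∀ k, k < j → i + k < cs.length ∧ cs.getD k ' ' = cs.getD (i + k) ' ') :
    bWhile cs i j = bWhile cs i 0 := by
  induction j with
  | zero => rfl
  | succ m ih =>
      rw [← bWhile_step cs i m (h m (by omega))]
      exact ih (fun k hk => h k (by omega))

theorem bWhile_zero (cs : List Char) (j : Nat) (h : j ≤ cs.length) :
    bWhile cs 0 j = cs.length := by
  rw [bWhile]
  split
  · exact bWhile_zero cs (j + 1) (by omega)
  · rename_i hc
    simp at hc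
    omega
termination_by cs.length - j
decreasing_by omega

-- the loop invariant of A's Z-algorithm pass, about to process index i
def ZInv (cs : List Char) (i : Nat) (s : List Nat × Nat × Nat) : Prop :=
  s.1.length = cs.length ∧ s.2.1 < i ∧ s.2.2 < cs.length ∧
  (∀ k, 1 ≤ k → k < i → s.1.getD k 0 = bWhile cs k 0) ∧
  (∀ k, k < s.1.length → (k = 0 ∨ i ≤ k) → s.1.getD k 0 = 0) ∧
  (∀ k, s.2.1 + k ≤ s.2.2 → cs.getD (s.2.1 + k) ' ' = cs.getD k ' ')

theorem getD_set_self (z : List Nat) (i v : Nat) (h : i < z.length) :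
    (z.set i v).getD i 0 = v := by
  simp [List.getD, h]

theorem getD_set_ne (z : List Nat) (i v k : Nat) (h : i ≠ k) :
    (z.set i v).getD k 0 = z.getD k 0 := by
  simp [List.getD, List.getElem?_set_ne h]

theorem ZInv_step (cs : List Char) (i : Nat) (s : List Nat × Nat × Nat)
    (hi1 : 1 ≤ i) (hin : i < cs.length) (hs : ZInv cs i s) :
    ZInv cs (i + 1) (aStep cs s i) := by
  obtain ⟨z, l, r⟩ := s
  obtain ⟨hlen, hli, hrn, hdone, hzero, hbox⟩ := hs
  simp only at hlen hli hrn hdone hzero hbox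
  set z0 := if i ≤ r then min (r - i + 1) (z.getD (i - l) 0) else 0 with hz0
  set zi := aWhile cs i z0 with hzidef
  have hstep : aStep cs (z, l, r) i =
      if i + zi - 1 > r then (z.set i zi, i, i + zi - 1) else (z.set i zi, l, r) := rfl
  have hmatch : ∀ k, k < z0 → i + k < cs.length ∧ cs.getD k ' ' = cs.getD (i + k) ' ' := by
    intro k hk
    rw [hz0] at hk
    by_cases hir : i ≤ r
    · rw [if_pos hir] at hk
      by_cases hl0 : l = 0
      · have h00 : z.getD (i - l) 0 = 0 := by
          rw [hl0, Nat.sub_zero]; exact hzero i (by omega) (Or.inr le_rfl)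
        omega
      · have hil : 1 ≤ i - l := by omega
        have hw := hdone (i - l) hil (by omega)
        rw [hw] at hk
        have hm := bWhile_matches cs (i - l) 0 k (Nat.zero_le k) (by omega)
        have hikr : i + k ≤ r := by omega
        have hb := hbox (i - l + k) (by omega)
        have he : l + (i - l + k) = i + k := by omega
        rw [he] at hb
        exact ⟨by omega, hm.2.trans hb.symm⟩
    · rw [if_neg hir] at hk; omega
  have hzi : zi = bWhile cs i 0 := by
    rw [hzidef, aWhile_eq_bWhile]; exact bWhile_from cs i z0 hmatch
  have hziub : i + zi ≤ cs.length := by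
    rw [hzidef, aWhile_eq_bWhile]
    apply bWhile_le
    rw [hz0]; split <;> omega
  have hzim : ∀ k, k < zi → i + k < cs.length ∧ cs.getD k ' ' = cs.getD (i + k) ' ' :=
    fun k hk => bWhile_matches cs i 0 k (Nat.zero_le k) (hzi ▸ hk)
  rw [hstep]
  have hset_len : (z.set i zi).length = cs.length := by simp [hlen]
  have hset_done : ∀ k, 1 ≤ k → k < i + 1 → (z.set i zi).getD k 0 = bWhile cs k 0 := by
    intro k h1 h2
    by_cases hk : k = i
    · subst hk; rw [getD_set_self z k zi (by omega), hzi]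
    · rw [getD_set_ne z i zi k (by omega)]; exact hdone k h1 (by omega)
  have hset_zero : ∀ k, k < (z.set i zi).length → (k = 0 ∨ i + 1 ≤ k) →
      (z.set i zi).getD k 0 = 0 := by
    intro k hk hor
    rw [getD_set_ne z i zi k (by omega)]
    exact hzero k (by simpa using hk) (by omega)
  split
  · rename_i hgt
    refine ⟨hset_len, by show i < i + 1; omega, by show i + zi - 1 < cs.length; omega,
      hset_done, hset_zero, ?_⟩
    intro k hk
    have hk' : i + k ≤ i + zi - 1 := hk
    have hkzi : k < zi := by omega
    exact (hzim k hkzi).2.symm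
  · exact ⟨hset_len, by show l < i + 1; omega, hrn, hset_done, hset_zero, hbox⟩

theorem ZInv_fold (cs : List Char) (m : Nat) : ∀ (i : Nat) (s : List Nat × Nat × Nat),
    1 ≤ i → i + m ≤ cs.length → ZInv cs i s →
    ZInv cs (i + m) (List.foldl (aStep cs) s (List.range' i m 1)) := by
  induction m with
  | zero => intro i s _ _ hs; simpa using hs
  | succ m ih =>
      intro i s hi1 him hs
      rw [List.range'_succ, List.foldl_cons]
      have := ih (i + 1) (aStep cs s i) (by omega) (by omega)
        (ZInv_step cs i s hi1 (by omega) hs)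
      have harith : i + 1 + m = i + (m + 1) := by omega
      rwa [harith] at this

theorem sum_eq_range_getD (z : List Nat) :
    z.sum = ((List.range z.length).map (fun k => z.getD k 0)).sum := by
  induction z with
  | nil => simp
  | cons hd tl ih =>
      simp only [List.length_cons, List.range_succ_eq_map, List.map_cons, List.sum_cons,
        List.map_map]
      have hmap : (List.range tl.length).map ((fun k => (hd :: tl).getD k 0) ∘ Nat.succ)
           = (List.range tl.length).map (fun k => tl.getD k 0) := by
        apply List.map_congr_left
        intro k _
        simp [List.getD]
      rw [hmap, ← ih]
      simp [List.getD]

theorem foldl_add_map (f : Nat → Nat) (l : List Nat) : ∀ t : Nat,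
    List.foldl (fun t i => t + f i) t l = t + (l.map f).sum := by
  induction l with
  | nil => simp
  | cons hd tl ih => intro t; simp [ih, Nat.add_assoc]

-- ===== VERDICT (by name: the statement is the Claim_ definition above) =====
theorem stringSimilarity_spec : Claim_equal_stringSimilarity := by
  intro a _
  unfold Spec_stringSimilarity stringSimilarity stringSimilarity_alt
  set cs := a.toList with hcs
  set n := cs.length with hn
  simp only
  rw [foldl_add_map]
  rcases Nat.eq_zero_or_pos n with h0 | hpos
  · have hcs0 : cs = [] := List.length_eq_zero_iff.mp (by omega)
    simp [hcs0]
  · have hinit : ZInv cs 1 (List.replicate n 0, 0, 0) := by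
      refine ⟨by simp [hn], by show (0:Nat) < 1; omega, by show (0:Nat) < cs.length; omega,
        by intro k h1 h2; omega, ?_, ?_⟩
      · intro k hk _
        simp [List.getD, List.getElem?_replicate]
        split <;> rfl
      · intro k hk
        have hk' : 0 + k ≤ 0 := hk
        have hk0 : k = 0 := by omega
        subst hk0
        rfl
    have hfold := ZInv_fold cs (n - 1) 1 (List.replicate n 0, 0, 0) (le_refl 1)
      (by omega) hinit
    have h1n : 1 + (n - 1) = n := by omega
    rw [h1n] at hfold
    set s := List.foldl (aStep cs) (List.replicate n 0, 0, 0) (List.range' 1 (n - 1) 1) with hsdef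
    obtain ⟨hlen, -, -, hdone, hzero, -⟩ := hfold
    rw [sum_eq_range_getD s.1, hlen, ← hn]
    have hrange : List.range n = 0 :: List.range' 1 (n - 1) 1 := by
      rw [List.range_eq_range']
      conv_lhs => rw [show n = (n - 1) + 1 from by omega]
      rw [List.range'_succ]
    rw [hrange]
    simp only [List.map_cons, List.sum_cons]
    have h00 : s.1.getD 0 0 = 0 := hzero 0 (by rw [hlen]; omega) (Or.inl rfl)
    have hmap1 : (List.range' 1 (n - 1) 1).map (fun k => s.1.getD k 0)
        = (List.range' 1 (n - 1) 1).map (fun i => bWhile cs i 0) := by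
      apply List.map_congr_left
      intro k hk
      rw [List.mem_range'_1] at hk
      exact hdone k hk.1 (by omega)
    rw [h00, hmap1, bWhile_zero cs 0 (Nat.zero_le _), ← hn]
    push_cast
    ring
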